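-- pv_equiv track=rewrite | github.com/neternefer/codewars | python/consonantVal.py | solve
-- ===== SOURCE A (Python) =====
-- import string
--
-- def solve(s):
--     scores = set()
--     count = 0
--     vowels = set('aeiouAEIOU')
--     r = ''.join(letter if letter not in vowels else "@" for letter in s)
--     for letter in r:
--         if letter not in vowels and letter != '@':
--             count += (string.ascii_lowercase.index(letter) + 1)
--         else:
--             scores.add(count)
--             count = 0
--         scores.add(count)
--     return max(scores)
-- ===== SOURCE B (Python) =====
-- import string
--
-- def solve(s):
--     best = 0
--     i, n = 0, len(s)
--     while i < n:
--         if s[i] in 'aeiouAEIOU':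
--             i += 1
--         else:
--             j = i
--             total = 0
--             while j < n and s[j] not in 'aeiouAEIOU':
--                 total += string.ascii_lowercase.index(s[j]) + 1
--                 j += 1
--             if total > best:
--                 best = total
--             i = j
--     return best
-- ===== Notes on version B (the rewrite author's own statement) =====
-- stated objective: alternative
-- what changed: A makes one pass that replaces vowels by an '@' sentinel and accumulates EVERY prefix score of the current consonant run into a set, returning max(set); B uses an index-based outer loop over consonant-run starts with a nested inner loop that sums each whole run, keeping only a running maximum and no set.
-- outside the precondition, e.g. on solve('@'): A returns 0, B raises ValueError; on solve('ab@cd'): A returns 7, B raises ValueError; on solve('@AoeIOoa'): A returns 0, B raises ValueError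
import Mathlib
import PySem

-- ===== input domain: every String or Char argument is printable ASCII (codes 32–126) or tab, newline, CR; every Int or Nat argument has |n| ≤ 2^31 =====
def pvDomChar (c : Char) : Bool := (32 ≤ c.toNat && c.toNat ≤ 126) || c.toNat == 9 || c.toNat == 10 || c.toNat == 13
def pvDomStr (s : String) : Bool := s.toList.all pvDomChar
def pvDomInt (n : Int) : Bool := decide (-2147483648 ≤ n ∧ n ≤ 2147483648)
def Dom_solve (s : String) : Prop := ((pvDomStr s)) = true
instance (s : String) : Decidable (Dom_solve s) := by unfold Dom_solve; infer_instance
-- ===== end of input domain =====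

-- B replaces A's single pass (vowels translated to an '@' sentinel, every prefix score of the current run collected in a set, max at the end) by an index-based outer loop over consonant-run starts with a nested inner loop summing each run and a running maximum.
set_option maxRecDepth 4096


-- constants of the Python module shared by both programs: string.ascii_lowercase, the vowel string,
-- and string.ascii_lowercase.index(c) + 1 (Python raises ValueError where index? = none; excluded by Pre_solve)
def pvAbc : List Char := ['a','b','c','d','e','f','g','h','i','j','k','l','m','n','o','p','q','r','s','t','u','v','w','x','y','z']
def pvVowelChars : List Char := ['a','e','i','o','u','A','E','I','O','U']
def pvVal (c : Char) : Int := (((PySem.List.index? pvAbc c).getD 0 : Nat) : Int) + 1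

-- ===== PORT A =====
def pvVowelsA : PySem.Set Char := PySem.Set.ofList pvVowelChars   -- vowels = set('aeiouAEIOU')

def solve (s : String) : Int :=
  let r : List Char :=
    s.toList.map (fun letter => if PySem.Set.contains pvVowelsA letter = false then letter else '@')
  let p : PySem.Set Int × Int :=
    r.foldl
      (fun p letter =>
        let q : PySem.Set Int × Int :=
          if PySem.Set.contains pvVowelsA letter = false ∧ letter ≠ '@' then
            (p.1, p.2 + pvVal letter)
          else
            (PySem.Set.add p.1 p.2, 0)
        (PySem.Set.add q.1 q.2, q.2))
      (PySem.Set.empty, 0)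
  -- max(scores): Python raises ValueError on the empty set (s = ""), excluded by Pre_solve
  (PySem.List.max? p.1 (fun x => x)).getD 0

-- ===== PORT B =====
-- inner 'while j < n and s[j] not in vowels' loop of Source B: returns (total of the run, final j)
def pvRun (s : List Char) (j : Nat) : Int × Nat :=
  if h : j < s.length then
    if s[j] ∈ pvVowelChars then (0, j)
    else
      let p := pvRun s (j + 1)
      (pvVal s[j] + p.1, p.2)
  else (0, j)
termination_by s.length - j

lemma pvRun_eq_vowel (s : List Char) (j : Nat) (h : j < s.length)
    (hv : s[j] ∈ pvVowelChars) : pvRun s j = (0, j) := by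
  rw [pvRun, dif_pos h, if_pos hv]

lemma pvRun_eq_cons (s : List Char) (j : Nat) (h : j < s.length)
    (hv : s[j] ∉ pvVowelChars) :
    pvRun s j = (pvVal s[j] + (pvRun s (j + 1)).1, (pvRun s (j + 1)).2) := by
  rw [pvRun, dif_pos h, if_neg hv]

lemma pvRun_eq_end (s : List Char) (j : Nat) (h : ¬ j < s.length) : pvRun s j = (0, j) := by
  rw [pvRun, dif_neg h]

lemma pvRun_ge (s : List Char) (j : Nat) : j ≤ (pvRun s j).2 := by
  induction hn : s.length - j using Nat.strong_induction_on generalizing j with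
  | _ n ih =>
    by_cases h : j < s.length
    · by_cases hv : s[j] ∈ pvVowelChars
      · rw [pvRun_eq_vowel s j h hv]
      · rw [pvRun_eq_cons s j h hv]
        have := ih (s.length - (j + 1)) (by omega) (j + 1) rfl
        omega
    · rw [pvRun_eq_end s j h]

-- termination helper for the outer loop: a consonant position strictly advances j
lemma pvRun_gt (s : List Char) (j : Nat) (h : j < s.length)
    (hv : s[j] ∉ pvVowelChars) : j < (pvRun s j).2 := by
  rw [pvRun_eq_cons s j h hv]
  have := pvRun_ge s (j + 1)
  omega

-- outer 'while i < n' loop of Source B with the running maximum 'best'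
def pvOuter (s : List Char) (i : Nat) (best : Int) : Int :=
  if h : i < s.length then
    if hv : s[i] ∈ pvVowelChars then pvOuter s (i + 1) best
    else
      let p := pvRun s i
      pvOuter s p.2 (if p.1 > best then p.1 else best)
  else best
termination_by s.length - i
decreasing_by
  · omega
  · have := pvRun_gt s i h hv; omega

def solve_alt (s : String) : Int := pvOuter s.toList 0 0

-- ===== PRECONDITION & SPEC =====
-- Pre_ excludes the inputs on which A raises ValueError (the empty string, and any character
-- that is neither a lowercase letter nor an uppercase vowel, on which ascii_lowercase.index
-- raises) together with strings containing '@', where A's '@' sentinel accidentally treats a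
-- literal '@' as a vowel and returns while B's own .index raises ValueError.
def Pre_solve (s : String) : Prop :=
  s.toList ≠ [] ∧
    (s.toList.all (fun c => decide (c ∈ pvAbc ∨ c ∈ (['A', 'E', 'I', 'O', 'U'] : List Char)))) = true
instance (s : String) : Decidable (Pre_solve s) := by unfold Pre_solve; infer_instance

def pvWitness_solve : String := "zodiac"

def Spec_solve (s : String) (out : Int) : Prop := out = solve_alt s
instance (s : String) (out : Int) : Decidable (Spec_solve s out) := by unfold Spec_solve; infer_instance

-- ===== CLAIM (what is proved, stated in full; the proofs are below) =====
def Claim_equal_solve : Prop := ∀ (s : String), Dom_solve s → Pre_solve s → Spec_solve s (solve s)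

-- ===== LEMMAS AND PROOFS =====

-- small character facts
lemma pv_abc_ne_at : ∀ c ∈ pvAbc, c ≠ '@' := by intro c hc; fin_cases hc <;> decide
lemma pv_upper_sub : ∀ c ∈ (['A','E','I','O','U'] : List Char), c ∈ pvVowelChars := by
  intro c hc; fin_cases hc <;> decide

lemma pvVal_pos (c : Char) : 0 < pvVal c := by
  unfold pvVal
  have : (0 : Int) ≤ (((PySem.List.index? pvAbc c).getD 0 : Nat) : Int) := Int.natCast_nonneg _
  omega

-- max(scores) equals a known upper bound that is a member
lemma pv_max_getD (scores : PySem.Set Int) (best : Int)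
    (hmem : best ∈ scores) (hub : ∀ y ∈ scores, y ≤ best) :
    (PySem.List.max? scores (fun x => x)).getD 0 = best := by
  cases h : PySem.List.max? scores (fun x => x) with
  | none => exact absurd ((PySem.List.max?_eq_none_iff _ _).mp h ▸ hmem) (List.not_mem_nil)
  | some m =>
    have h1 : m ≤ best := hub m (PySem.List.max?_mem h)
    have h2 : best ≤ m := PySem.List.max?_isMax h best hmem
    simp [le_antisymm h1 h2]

-- common reference: one left-to-right pass, current-run sum and running best
def pvRef : List Char → Int → Int → Int
  | [], _, best => best
  | c :: rest, cur, best =>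
    if c ∈ pvVowelChars then pvRef rest 0 best
    else pvRef rest (cur + pvVal c) (max best (cur + pvVal c))

def pvGood (l : List Char) : Prop :=
  ∀ c ∈ l, c ∈ pvAbc ∨ c ∈ (['A', 'E', 'I', 'O', 'U'] : List Char)

lemma pv_good_cons {c : Char} {l : List Char} (h : pvGood (c :: l)) :
    (c ∈ pvAbc ∨ c ∈ (['A','E','I','O','U'] : List Char)) ∧ pvGood l :=
  ⟨h c (by simp), fun d hd => h d (by simp [hd])⟩

-- a good non-vowel character is a lowercase letter
lemma pv_cons_char {c : Char} (hg : c ∈ pvAbc ∨ c ∈ (['A','E','I','O','U'] : List Char))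
    (hv : c ∉ pvVowelChars) : c ∈ pvAbc := by
  rcases hg with h | h
  · exact h
  · exact absurd (pv_upper_sub c h) hv

-- A's loop body, as a function of the ORIGINAL character (the map is fused by List.foldl_map)
def pvStepA (p : PySem.Set Int × Int) (c : Char) : PySem.Set Int × Int :=
  let letter := if PySem.Set.contains pvVowelsA c = false then c else '@'
  let q : PySem.Set Int × Int :=
    if PySem.Set.contains pvVowelsA letter = false ∧ letter ≠ '@' then
      (p.1, p.2 + pvVal letter)
    else
      (PySem.Set.add p.1 p.2, 0)
  (PySem.Set.add q.1 q.2, q.2)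

lemma pv_mem_vowelsA (c : Char) : c ∈ pvVowelsA ↔ c ∈ pvVowelChars := by
  rw [pvVowelsA]; exact PySem.Set.mem_ofList _ _

lemma pvStepA_vowel (p : PySem.Set Int × Int) (c : Char) (hv : c ∈ pvVowelChars) :
    pvStepA p c = (PySem.Set.add (PySem.Set.add p.1 p.2) 0, 0) := by
  have hm : c ∈ pvVowelsA := (pv_mem_vowelsA c).mpr hv
  simp [pvStepA, hm]

lemma pvStepA_cons (p : PySem.Set Int × Int) (c : Char) (habc : c ∈ pvAbc)
    (hv : c ∉ pvVowelChars) :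
    pvStepA p c = (PySem.Set.add p.1 (p.2 + pvVal c), p.2 + pvVal c) := by
  have hm : c ∉ pvVowelsA := fun h => hv ((pv_mem_vowelsA c).mp h)
  simp [pvStepA, hm, pv_abc_ne_at c habc]

-- A's loop computes pvRef: scores always holds the current count, best is its maximum
lemma pvA_loop (l : List Char) : ∀ (scores : PySem.Set Int) (cnt best : Int),
    pvGood l → cnt ∈ scores → best ∈ scores → (∀ y ∈ scores, y ≤ best) →
    0 ≤ best → 0 ≤ cnt →
    (PySem.List.max? (l.foldl pvStepA (scores, cnt)).1 (fun x => x)).getD 0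
      = pvRef l cnt best := by
  induction l with
  | nil =>
    intro scores cnt best _ _ hm hub _ _
    exact pv_max_getD scores best hm hub
  | cons c rest ih =>
    intro scores cnt best hg hcm hm hub hb hc0
    obtain ⟨hgc, hgr⟩ := pv_good_cons hg
    rw [List.foldl_cons, pvRef]
    by_cases hv : c ∈ pvVowelChars
    · rw [if_pos hv, pvStepA_vowel _ _ hv]
      refine ih _ 0 best hgr (by simp [PySem.Set.mem_add]) ?_ ?_ hb le_rfl
      · simp [PySem.Set.mem_add, hm]
      · intro y hy
        rcases (PySem.Set.mem_add _ _ _).mp hy with hy' | rfl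
        · rcases (PySem.Set.mem_add _ _ _).mp hy' with hy'' | rfl
          · exact hub y hy''
          · exact hub _ hcm
        · exact hb
    · have habc : c ∈ pvAbc := pv_cons_char hgc hv
      rw [if_neg hv, pvStepA_cons _ _ habc hv]
      have hval := pvVal_pos c
      refine ih _ _ (max best (cnt + pvVal c)) hgr (by simp [PySem.Set.mem_add]) ?_ ?_
        (le_trans hb (le_max_left _ _)) (by omega)
      · rcases le_total best (cnt + pvVal c) with h | h
        · rw [max_eq_right h]; simp [PySem.Set.mem_add]
        · rw [max_eq_left h]; simp [PySem.Set.mem_add, hm]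
      · intro y hy
        rcases (PySem.Set.mem_add _ _ _).mp hy with hy' | rfl
        · exact le_trans (hub y hy') (le_max_left _ _)
        · exact le_max_right _ _

lemma pv_solve_eq (s : String) :
    solve s = (PySem.List.max? ((s.toList.foldl pvStepA (PySem.Set.empty, 0)).1) (fun x => x)).getD 0 := by
  simp only [solve]
  rw [List.foldl_map]
  rfl

lemma pv_A_ref (l : List Char) (hg : pvGood l) (hne : l ≠ []) :
    (PySem.List.max? ((l.foldl pvStepA (PySem.Set.empty, 0)).1) (fun x => x)).getD 0
      = pvRef l 0 0 := by
  cases l with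
  | nil => exact absurd rfl hne
  | cons c l' =>
    obtain ⟨hgc, hgr⟩ := pv_good_cons hg
    rw [List.foldl_cons, pvRef]
    by_cases hv : c ∈ pvVowelChars
    · rw [if_pos hv]
      have hstep : pvStepA (PySem.Set.empty, 0) c = ([0], 0) := by
        rw [pvStepA_vowel _ _ hv]; rfl
      rw [hstep]
      exact pvA_loop l' [0] 0 0 hgr (by simp) (by simp) (by simp) le_rfl le_rfl
    · have habc : c ∈ pvAbc := pv_cons_char hgc hv
      rw [if_neg hv]
      have hval := pvVal_pos c
      have hstep : pvStepA (PySem.Set.empty, 0) c = ([0 + pvVal c], 0 + pvVal c) := by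
        rw [pvStepA_cons _ _ habc hv]; rfl
      rw [hstep]
      rw [pvA_loop l' [0 + pvVal c] (0 + pvVal c) (0 + pvVal c) hgr (by simp) (by simp)
        (by simp) (by omega) (by omega)]
      rw [max_eq_right (show (0:Int) ≤ 0 + pvVal c by omega)]

-- ============ B side ============

def pvRunSum : List Char → Int
  | [] => 0
  | c :: t => pvVal c + pvRunSum t

lemma pvRunSum_nonneg (l : List Char) : 0 ≤ pvRunSum l := by
  induction l with
  | nil => simp [pvRunSum]
  | cons c t ih => have := pvVal_pos c; rw [pvRunSum]; omega

def pvNoVowel (r : List Char) : Prop := ∀ c ∈ r, c ∉ pvVowelChars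

-- the inner loop computes the sum of a maximal, vowel-free consonant run
lemma pvRun_spec (s : List Char) (j : Nat) (hj : j ≤ s.length) :
    ∃ r : List Char,
      s.drop j = r ++ s.drop (pvRun s j).2 ∧
      (pvRun s j).1 = pvRunSum r ∧
      pvNoVowel r ∧
      j ≤ (pvRun s j).2 ∧ (pvRun s j).2 ≤ s.length ∧
      ((pvRun s j).2 = s.length ∨
        ∃ h : (pvRun s j).2 < s.length, s[(pvRun s j).2] ∈ pvVowelChars) := by
  induction hn : s.length - j using Nat.strong_induction_on generalizing j with
  | _ n ih =>
    by_cases h : j < s.length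
    · by_cases hv : s[j] ∈ pvVowelChars
      · rw [pvRun_eq_vowel s j h hv]
        exact ⟨[], by simp, by simp [pvRunSum], fun c hc => absurd hc (List.not_mem_nil),
          le_rfl, le_of_lt h, Or.inr ⟨h, hv⟩⟩
      · rw [pvRun_eq_cons s j h hv]
        obtain ⟨r, hdrop, hsum, hnv, hge, hle, hend⟩ :=
          ih (s.length - (j + 1)) (by omega) (j + 1) h rfl
        refine ⟨s[j] :: r, ?_, ?_, ?_, by omega, hle, hend⟩
        · rw [List.drop_eq_getElem_cons h, hdrop]; simp
        · simp [pvRunSum, hsum]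
        · intro c hc
          rcases List.mem_cons.mp hc with rfl | hc'
          · exact hv
          · exact hnv c hc'
    · rw [pvRun_eq_end s j h]
      exact ⟨[], by simp, by simp [pvRunSum], fun c hc => absurd hc (List.not_mem_nil),
        le_rfl, by omega, Or.inl (by omega)⟩

lemma pvOuter_eq_vowel (s : List Char) (i : Nat) (best : Int) (h : i < s.length)
    (hv : s[i] ∈ pvVowelChars) : pvOuter s i best = pvOuter s (i + 1) best := by
  rw [pvOuter, dif_pos h, dif_pos hv]

lemma pvOuter_eq_cons (s : List Char) (i : Nat) (best : Int) (h : i < s.length)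
    (hv : s[i] ∉ pvVowelChars) :
    pvOuter s i best
      = pvOuter s (pvRun s i).2 (if (pvRun s i).1 > best then (pvRun s i).1 else best) := by
  rw [pvOuter, dif_pos h, dif_neg hv]

lemma pvOuter_eq_end (s : List Char) (i : Nat) (best : Int) (h : ¬ i < s.length) :
    pvOuter s i best = best := by
  rw [pvOuter, dif_neg h]

-- pvRef over a consonant run: the run's full sum is added to cur and to best
lemma pvRef_run (r : List Char) : ∀ (rest : List Char) (cur best : Int),
    0 ≤ cur → cur ≤ best →
    pvRef (r ++ rest) cur best = pvRef rest (cur + pvRunSum r) (max best (cur + pvRunSum r)) ∨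
      (∃ c ∈ r, c ∈ pvVowelChars) := by
  induction r with
  | nil =>
    intro rest cur best h0 hle
    left
    simp [pvRunSum, max_eq_left hle]
  | cons c t ih =>
    intro rest cur best h0 hle
    by_cases hv : c ∈ pvVowelChars
    · exact Or.inr ⟨c, by simp, hv⟩
    · have hval := pvVal_pos c
      rw [List.cons_append, pvRef, if_neg hv]
      rcases ih rest (cur + pvVal c) (max best (cur + pvVal c)) (by omega) (le_max_right _ _)
        with hmain | ⟨d, hd, hdv⟩
      · left
        rw [hmain, pvRunSum]
        have hsn := pvRunSum_nonneg t
        congr 1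
        · omega
        · rcases le_total best (cur + pvVal c) with h | h <;> rcases le_total best (cur + (pvVal c + pvRunSum t)) with h' | h' <;>
            simp [max_def] <;> omega
      · exact Or.inr ⟨d, by simp [hd], hdv⟩

-- the outer loop computes pvRef with cur = 0
lemma pvOuter_ref (s : List Char) (i : Nat) (best : Int) (hi : i ≤ s.length)
    (hb : 0 ≤ best) :
    pvOuter s i best = pvRef (s.drop i) 0 best := by
  induction hn : s.length - i using Nat.strong_induction_on generalizing i best with
  | _ n ih =>
    by_cases h : i < s.length
    · by_cases hv : s[i] ∈ pvVowelChars
      · rw [List.drop_eq_getElem_cons h, pvOuter_eq_vowel s i best h hv, pvRef, if_pos hv,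
          ih (s.length - (i + 1)) (by omega) (i + 1) best h hb rfl]
      · rw [pvOuter_eq_cons s i best h hv]
        obtain ⟨r, hdrop, hsum, hnv, hge, hle, hend⟩ := pvRun_spec s i (le_of_lt h)
        have hgt : i < (pvRun s i).2 := pvRun_gt s i h hv
        rw [hdrop]
        rcases pvRef_run r (s.drop (pvRun s i).2) 0 best le_rfl hb with hmain | ⟨c, hc, hcv⟩
        · rw [hmain, zero_add, ← hsum]
          have hrn : 0 ≤ (pvRun s i).1 := hsum ▸ pvRunSum_nonneg r
          have hbest : (if (pvRun s i).1 > best then (pvRun s i).1 else best)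
              = max best (pvRun s i).1 := by
            rcases le_total best (pvRun s i).1 with h' | h' <;> simp [max_def] <;> omega
          rw [hbest]
          rw [ih (s.length - (pvRun s i).2) (by omega) (pvRun s i).2
            (max best (pvRun s i).1) hle (le_trans hb (le_max_left _ _)) rfl]
          -- the tail starts at a vowel or is empty: pvRef drops the pending cur
          rcases hend with hEnd | ⟨hlt, hvv⟩
          · rw [hEnd]; simp [pvRef]
          · rw [List.drop_eq_getElem_cons hlt, pvRef, if_pos hvv, pvRef, if_pos hvv]
        · exact absurd hcv (hnv c hc)
    · rw [pvOuter_eq_end s i best h, List.drop_eq_nil_of_le (by omega), pvRef]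

lemma pv_B_ref (s : String) : solve_alt s = pvRef s.toList 0 0 := by
  rw [solve_alt, pvOuter_ref s.toList 0 0 (Nat.zero_le _) le_rfl, List.drop_zero]

-- ===== VERDICT (by name: the statement is the Claim_ definition above) =====
theorem solve_spec : Claim_equal_solve := by
  intro s _ hp
  have hg : pvGood s.toList := by
    intro c hc
    simpa using List.all_eq_true.mp hp.2 c hc
  rw [Spec_solve, pv_solve_eq, pv_A_ref s.toList hg hp.1, pv_B_ref]
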